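-- pv_equiv track=rewrite | github.com/FilippoSimonazzi/Python_Projects | AdventOfCode_2015/2015_20_p2.py | count_presents
-- ===== SOURCE A (Python) =====
-- from itertools import chain
-- from math import sqrt
--
-- def divisors(n):
--     return set(chain.from_iterable((i,n//i) for i in range(1,int(sqrt(n))+1) if n%i == 0))
--
-- def count_presents(n, count_div):
--     div = list(divisors(n))
--     tot = 0
--     for d in div:
--         count_div[d] += 1
--         if count_div[d] > 50:
--             continue
--         tot += d * 11
--     return tot, count_div
-- ===== SOURCE B (Python) =====
-- def count_presents(n, count_div):
--     # Build the divisor list from the prime factorisation of |n| (trial factoring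
--     # by increasing p, extending the list with the powers of each prime found;
--     # the remaining cofactor m > 1 is prime), instead of A's sqrt-bounded pair enumeration
--     # into a set.  0 has no divisors here.  Mutates count_div in place, like the
--     # original.
--     m = n if n >= 0 else -n
--     divs = [1] if m >= 1 else []
--     p = 2
--     while p * p <= m:
--         if m % p == 0:
--             e = 0
--             while m % p == 0:
--                 m //= p
--                 e += 1
--             divs = [d * p ** k for d in divs for k in range(e + 1)]
--         p += 1
--     if m > 1:
--         divs = [d * q for d in divs for q in (1, m)]
--     tot = 0
--     for d in divs:
--         count_div[d] += 1
--         if count_div[d] <= 50: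
--             tot += d * 11
--     return tot, count_div
-- ===== Notes on version B (the rewrite author's own statement) =====
-- stated objective: alternative
-- what changed: B builds the divisor list from the prime factorisation of |n| (trial-factoring by increasing p, extending the divisor list with the powers of each prime found, with the remaining prime cofactor appended at the end) instead of A's sqrt-bounded pair enumeration collected into a set.
import Mathlib
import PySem

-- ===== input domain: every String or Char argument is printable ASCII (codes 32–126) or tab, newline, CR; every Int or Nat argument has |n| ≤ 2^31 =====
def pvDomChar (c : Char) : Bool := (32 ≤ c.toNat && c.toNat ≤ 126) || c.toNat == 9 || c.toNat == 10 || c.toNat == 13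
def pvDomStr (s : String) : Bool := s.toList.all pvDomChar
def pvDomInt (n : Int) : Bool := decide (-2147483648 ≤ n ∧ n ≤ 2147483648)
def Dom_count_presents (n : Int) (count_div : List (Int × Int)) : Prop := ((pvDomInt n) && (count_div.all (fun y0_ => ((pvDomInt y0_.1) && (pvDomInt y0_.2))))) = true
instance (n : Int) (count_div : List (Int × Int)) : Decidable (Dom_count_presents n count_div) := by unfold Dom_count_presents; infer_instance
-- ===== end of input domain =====

-- B builds its divisor list from the prime factorisation of |n| instead of A's sqrt-bounded
-- pair enumeration into a set.  Both Pythons mutate the dict argument in place identically;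
-- the equivalence proved here is about the returned (tot, dict) pair.

-- ===== PORT A =====
-- integer square root, port of Python's int(sqrt(n)). Fuel-based binary search so the kernel
-- can evaluate it; with fuel 64 it is the exact integer square root for every n the domain
-- admits (|n| ≤ 2^31, where math.sqrt is correctly rounded); n ≤ 0 gives 0.
def pvIsqrtFuel (f : Nat) (n lo hi : Int) : Int :=
  match f with
  | 0 => lo
  | f+1 =>
    if hi - lo ≤ 1 then lo
    else
      let m := PySem.Int.floordiv (lo + hi) 2
      if m * m ≤ n then pvIsqrtFuel f n m hi else pvIsqrtFuel f n lo m

def pvIsqrt (n : Int) : Int := if n ≤ 0 then 0 else pvIsqrtFuel 64 n 0 (n + 1)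

-- the generator expression (i, n//i) for one i (chain flattens these pairs)
def pvPairA (n i : Int) : List Int :=
  if PySem.Int.mod n i == 0 then [i, PySem.Int.floordiv n i] else []

-- divisors(n) = set(chain.from_iterable((i, n//i) for i in range(1, int(sqrt(n))+1) if n%i == 0));
-- n < 0 raises ValueError in math.sqrt, outside Pre_.
def pvDivisors (n : Int) : PySem.Set Int :=
  PySem.Set.ofList ((PySem.List.pyRange 1 (pvIsqrt n + 1) 1).flatMap (pvPairA n))

-- the body of A's 'for d in div' loop (count_div[d] += 1; if count_div[d] > 50: continue; tot += d*11)
def pvBodyA (st : Int × PySem.Dict Int Int) (d : Int) : Int × PySem.Dict Int Int :=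
  let cd := st.2.modify d 0 (· + 1)
  if cd.getD d 0 > 50 then (st.1, cd) else (st.1 + d * 11, cd)

def count_presents (n : Int) (count_div : List (Int × Int)) : Int × (List (Int × Int)) :=
  let div : List Int := pvDivisors n
  let res := div.foldl pvBodyA (0, PySem.Dict.mk count_div)
  (res.1, res.2.items)

-- ===== PORT B =====
-- inner while: 'while m % p == 0: m //= p; e += 1' (state (e, m); fuel 64 covers every m the
-- domain admits, since m at least halves on each division)
def pvExtract (fuel : Nat) (p m e : Int) : Int × Int :=
  match fuel with
  | 0 => (e, m)
  | f+1 =>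
    if PySem.Int.mod m p == 0 then pvExtract f p (PySem.Int.floordiv m p) (e + 1) else (e, m)

-- the comprehension '[d * p ** k for d in divs for k in range(e + 1)]'
-- (k.toNat is exact: pyRange 0 (e+1) 1 yields only nonnegative k)
def pvExtend (divs : List Int) (p e : Int) : List Int :=
  divs.flatMap (fun d => (PySem.List.pyRange 0 (e + 1) 1).map (fun k => d * p ^ k.toNat))

-- outer while: 'while p * p <= m: ...; p += 1' (fuel 46341 covers every n the domain admits,
-- since p exceeds √m ≤ 46341 after at most 46340 increments; at fuel 0 the guard is checked
-- first, so the early return only happens where the loop would have stopped anyway)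
def pvFactorLoop (fuel : Nat) (m p : Int) (divs : List Int) : Int × List Int :=
  if p * p ≤ m then
    match fuel with
    | 0 => (m, divs)
    | f+1 =>
      if PySem.Int.mod m p == 0 then
        let em := pvExtract 64 p m 0
        pvFactorLoop f em.2 (p + 1) (pvExtend divs p em.1)
      else pvFactorLoop f m (p + 1) divs
  else (m, divs)

-- 'm = n if n >= 0 else -n; divs = [1] if m >= 1 else []; ...; if m > 1: divs = [d*q ...]'
def pvDivListB (n : Int) : List Int :=
  let m0 : Int := if n ≥ 0 then n else -n
  let divs0 : List Int := if m0 ≥ 1 then [1] else []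
  let r := pvFactorLoop 46341 m0 2 divs0
  if r.1 > 1 then r.2.flatMap (fun d => [d * 1, d * r.1]) else r.2

-- the body of B's 'for d in divs' loop (count_div[d] += 1; if count_div[d] <= 50: tot += d*11)
def pvBodyB (st : Int × PySem.Dict Int Int) (d : Int) : Int × PySem.Dict Int Int :=
  let cd := st.2.modify d 0 (· + 1)
  if cd.getD d 0 ≤ 50 then (st.1 + d * 11, cd) else (st.1, cd)

def count_presents_alt (n : Int) (count_div : List (Int × Int)) : Int × (List (Int × Int)) :=
  let res := (pvDivListB n).foldl pvBodyB (0, PySem.Dict.mk count_div)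
  (res.1, res.2.items)

-- ===== PRECONDITION & SPEC =====
-- Pre_ is exactly where the Python A returns on a genuine dict argument: n ≥ 0 (math.sqrt raises
-- ValueError on n < 0), every divisor of n already a key of count_div (count_div[d] += 1 raises
-- KeyError otherwise), and the association list has no duplicate keys (a Python dict cannot:
-- duplicate-key lists represent no dict input, so excluding them narrows nothing).
-- (the bound min(n+1, 46342) is closed form: 46341 = isqrt(2^31) covers every n the domain admits,
-- and d*d ≤ n restricts the check to the small halves of the divisor pairs)
def Pre_count_presents (n : Int) (count_div : List (Int × Int)) : Prop :=
  0 ≤ n ∧ (count_div.map Prod.fst).Nodup ∧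
  ∀ i ∈ PySem.List.pyRange 1 (min (n + 1) 46342) 1, (i * i ≤ n → PySem.Int.mod n i = 0 →
    (i ∈ count_div.map Prod.fst ∧ PySem.Int.floordiv n i ∈ count_div.map Prod.fst))
instance (n : Int) (count_div : List (Int × Int)) : Decidable (Pre_count_presents n count_div) := by
  unfold Pre_count_presents; infer_instance

def pvWitness_count_presents : Int × (List (Int × Int)) := (12, [(1, 3), (2, 50), (3, 49), (4, 0), (6, 51), (12, 7)])

def Spec_count_presents (n : Int) (count_div : List (Int × Int)) (out : Int × (List (Int × Int))) : Prop := out = count_presents_alt n count_div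
instance (n : Int) (count_div : List (Int × Int)) (out : Int × (List (Int × Int))) : Decidable (Spec_count_presents n count_div out) := by unfold Spec_count_presents; infer_instance

-- ===== CLAIM (what is proved, stated in full; the proofs are below) =====
def Claim_equal_count_presents : Prop := ∀ (n : Int) (count_div : List (Int × Int)), Dom_count_presents n count_div → Pre_count_presents n count_div → Spec_count_presents n count_div (count_presents n count_div)

-- ===== LEMMAS AND PROOFS =====

-- the one-step normal form of A's loop body
theorem pvBodyA_eq (st : Int × PySem.Dict Int Int) (d : Int) :
    pvBodyA st d =
      ((if st.2.getD d 0 + 1 > 50 then st.1 else st.1 + d * 11), st.2.modify d 0 (· + 1)) := by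
  unfold pvBodyA
  dsimp only
  rw [PySem.Dict.getD_modify_self]
  split_ifs <;> rfl

-- B's loop body is A's loop body (the cap tests are complementary)
theorem pvBodyB_eq_pvBodyA : pvBodyB = pvBodyA := by
  funext st d
  rw [pvBodyA_eq]
  unfold pvBodyB
  dsimp only
  rw [PySem.Dict.getD_modify_self]
  split_ifs <;> first | rfl | omega

-- binary search is the exact integer square root when the fuel covers the interval
theorem pvIsqrtFuel_correct (n : Int) : ∀ (f : Nat) (lo hi : Int), 0 ≤ lo → lo * lo ≤ n →
    n < hi * hi → 0 ≤ hi → hi - lo ≤ 2 ^ f →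
    0 ≤ pvIsqrtFuel f n lo hi ∧ pvIsqrtFuel f n lo hi * pvIsqrtFuel f n lo hi ≤ n ∧
      n < (pvIsqrtFuel f n lo hi + 1) * (pvIsqrtFuel f n lo hi + 1) := by
  intro f
  induction f with
  | zero =>
    intro lo hi h0 hlo hhi hh0 hf
    have hlt : lo < hi := by nlinarith
    have : hi = lo + 1 := by simp at hf; omega
    subst this
    exact ⟨h0, hlo, by simpa using hhi⟩
  | succ f ih =>
    intro lo hi h0 hlo hhi hh0 hf
    unfold pvIsqrtFuel
    have hlt : lo < hi := by nlinarith
    by_cases hw : hi - lo ≤ 1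
    · have : hi = lo + 1 := by omega
      subst this
      simp only [if_pos hw]
      exact ⟨h0, hlo, by simpa using hhi⟩
    · simp only [if_neg hw]
      have hm : PySem.Int.floordiv (lo + hi) 2 = (lo + hi) / 2 :=
        PySem.Int.floordiv_eq_ediv_of_pos (by norm_num)
      have hp : (2:Int) ^ (f+1) = 2 * 2 ^ f := by ring
      rw [hp] at hf
      have hmlo : lo < (lo + hi) / 2 := by omega
      have hmhi : (lo + hi) / 2 < hi := by omega
      have hg1 : hi - (lo + hi) / 2 ≤ 2 ^ f := by omega
      have hg2 : (lo + hi) / 2 - lo ≤ 2 ^ f := by omega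
      rw [hm]
      by_cases hsq : (lo + hi) / 2 * ((lo + hi) / 2) ≤ n
      · simp only [if_pos hsq]
        exact ih _ _ (by omega) hsq hhi hh0 hg1
      · simp only [if_neg hsq]
        exact ih _ _ h0 hlo (by omega) (by omega) hg2

theorem pvIsqrt_correct (n : Int) (hn : 0 ≤ n) (hb : n ≤ 2147483648) :
    0 ≤ pvIsqrt n ∧ pvIsqrt n * pvIsqrt n ≤ n ∧ n < (pvIsqrt n + 1) * (pvIsqrt n + 1) := by
  unfold pvIsqrt
  by_cases h : n ≤ 0
  · have : n = 0 := le_antisymm h hn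
    subst this; norm_num
  · simp only [if_neg h]
    exact pvIsqrtFuel_correct n 64 0 (n + 1) le_rfl (by nlinarith) (by nlinarith) (by omega)
      (by norm_num; omega)

-- every divisor x of n has a partner i ≤ √n with x ∈ {i, n // i}
theorem pvSmallPartner (n x : Int) (hx1 : 1 ≤ x) (hxn : x ≤ n) (hdvd : x ∣ n) :
    ∃ i, 1 ≤ i ∧ i * i ≤ n ∧ PySem.Int.mod n i = 0 ∧
      (x = i ∨ x = PySem.Int.floordiv n i) := by
  obtain ⟨c, hc⟩ := hdvd
  have hn1 : 1 ≤ n := by omega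
  have hc1 : 1 ≤ c := by nlinarith
  by_cases hsq : x * x ≤ n
  · exact ⟨x, hx1, hsq, (PySem.Int.mod_eq_zero_iff_dvd n x).2 ⟨c, hc⟩, Or.inl rfl⟩
  · refine ⟨c, hc1, by nlinarith, (PySem.Int.mod_eq_zero_iff_dvd n c).2 ⟨x, by rw [hc, mul_comm]⟩,
      Or.inr ?_⟩
    rw [PySem.Int.floordiv_eq_ediv_of_pos (by omega : (0:Int) < c), hc]
    exact (Int.mul_ediv_cancel x (show c ≠ 0 by omega)).symm

-- the elements of A's divisor set are exactly the divisors of n in [1, n]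
theorem mem_pvDivisors (n x : Int) (hn : 0 ≤ n) (hb : n ≤ 2147483648) :
    x ∈ pvDivisors n ↔ (1 ≤ x ∧ x ≤ n ∧ x ∣ n) := by
  obtain ⟨hs0, hss, hsu⟩ := pvIsqrt_correct n hn hb
  unfold pvDivisors
  rw [PySem.Set.mem_ofList, List.mem_flatMap]
  constructor
  · rintro ⟨i, hi, hx⟩
    rw [PySem.List.mem_pyRange_one] at hi
    obtain ⟨hi1, hi2⟩ := hi
    have hiin : i * i ≤ n := by nlinarith
    have hn1 : 1 ≤ n := by nlinarith
    by_cases hm : PySem.Int.mod n i = 0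
    · have hdvd : i ∣ n := (PySem.Int.mod_eq_zero_iff_dvd n i).1 hm
      have hfd : PySem.Int.floordiv n i = n / i := PySem.Int.floordiv_eq_ediv_of_pos (by omega)
      have hci : n / i * i = n := Int.ediv_mul_cancel hdvd
      have hx' : x = i ∨ x = n / i := by simpa [pvPairA, hm, hfd] using hx
      have hq1 : 1 ≤ n / i := by nlinarith
      rcases hx' with h | h
      · subst h; exact ⟨hi1, by nlinarith, hdvd⟩
      · subst h
        exact ⟨hq1, by nlinarith, ⟨i, hci.symm⟩⟩
    · simp [pvPairA, hm] at hx
  · rintro ⟨hx1, hxn, hdvd⟩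
    obtain ⟨i, hi1, hii, hm, hxi⟩ := pvSmallPartner n x hx1 hxn hdvd
    have his : i ≤ pvIsqrt n := by nlinarith
    refine ⟨i, PySem.List.mem_pyRange_one.2 ⟨hi1, by omega⟩, ?_⟩
    simp only [pvPairA, hm, beq_self_eq_true, if_true]
    rcases hxi with h | h <;> simp [h]

-- ---- B-side number theory: the factorisation loop produces exactly the divisors ----

-- positive Int primes are ≥ 2
theorem pvPrimeTwoLe (q : Int) (h0 : 0 < q) (hq : Prime q) : 2 ≤ q := by
  have h2 := (Int.prime_iff_natAbs_prime.1 hq).two_le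
  omega

-- every m > 1 has a positive prime divisor
theorem pvExistsPosPrime (m : Int) (hm : 1 < m) : ∃ q, 0 < q ∧ Prime q ∧ q ∣ m := by
  obtain ⟨q, hq, hqd⟩ := Int.exists_prime_and_dvd (n := m) (by omega)
  have h2 := (Int.prime_iff_natAbs_prime.1 hq).two_le
  refine ⟨(q.natAbs : Int), by omega, ?_, Int.natAbs_dvd.2 hqd⟩
  rw [Int.prime_iff_natAbs_prime, Int.natAbs_natCast]
  exact Int.prime_iff_natAbs_prime.1 hq

-- write any x ≥ 1 as p^k * y with p ∤ y
theorem pvPowFactorAux (p : Int) (hp : 2 ≤ p) : ∀ (N : Nat) (x : Int), x.toNat ≤ N → 1 ≤ x →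
    ∃ (k : Nat) (y : Int), x = p ^ k * y ∧ 1 ≤ y ∧ ¬ p ∣ y := by
  intro N
  induction N with
  | zero => intro x h1 h2; omega
  | succ N ih =>
    intro x hN hx
    by_cases hdvd : p ∣ x
    · have hple := Int.le_of_dvd (by omega) hdvd
      have hmp : p * (x / p) = x := Int.mul_ediv_cancel' hdvd
      have h1 : 1 ≤ x / p := by nlinarith
      have hlt : x / p < x := by nlinarith
      have hN' : (x / p).toNat ≤ N := by omega
      obtain ⟨k, y, he, hy, hnd⟩ := ih (x / p) hN' h1
      exact ⟨k + 1, y, by rw [← hmp, he]; ring, hy, hnd⟩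
    · exact ⟨0, x, by ring, hx, hdvd⟩

theorem pvPowFactor (p x : Int) (hp : 2 ≤ p) (hx : 1 ≤ x) :
    ∃ (k : Nat) (y : Int), x = p ^ k * y ∧ 1 ≤ y ∧ ¬ p ∣ y :=
  pvPowFactorAux p hp x.toNat x le_rfl hx

-- the inner while extracts the full power of p
theorem pvExtract_spec : ∀ (f : Nat) (m e p : Int), 2 ≤ p → 1 ≤ m → m < 2 ^ f →
    ∃ k : Nat, pvExtract f p m e = (e + (k : Int), m / p ^ k) ∧ p ^ k ∣ m ∧
      ¬ p ∣ (m / p ^ k) ∧ 1 ≤ m / p ^ k := by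
  intro f
  induction f with
  | zero => intro m e p hp hm hbound; simp at hbound; omega
  | succ f ih =>
    intro m e p hp hm hbound
    unfold pvExtract
    by_cases hdvd : PySem.Int.mod m p = 0
    · have hpd : p ∣ m := (PySem.Int.mod_eq_zero_iff_dvd m p).1 hdvd
      have hfd : PySem.Int.floordiv m p = m / p := PySem.Int.floordiv_eq_ediv_of_pos (by omega)
      have hple : p ≤ m := Int.le_of_dvd (by omega) hpd
      have hmp : p * (m / p) = m := Int.mul_ediv_cancel' hpd
      have hm1 : 1 ≤ m / p := by nlinarith
      have h2f : (2:Int) ^ (f+1) = 2 * 2 ^ f := by ring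
      have hm2 : m / p < 2 ^ f := by nlinarith [hm1]
      obtain ⟨k, hres, hdk, hnd, hpos⟩ := ih (m / p) (e + 1) p hp hm1 hm2
      have hdiv : m / p / p ^ k = m / p ^ (k + 1) := by
        rw [Int.ediv_ediv_eq_ediv_mul (by omega), ← pow_succ']
      refine ⟨k + 1, ?_, ?_, ?_, ?_⟩
      · simp only [hdvd, beq_self_eq_true, if_true, hfd]
        rw [hres, hdiv]
        congr 1
        push_cast; ring
      · obtain ⟨t, ht⟩ := hdk
        exact ⟨t, by rw [← hmp, ht]; ring⟩
      · rw [← hdiv]; exact hnd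
      · rw [← hdiv]; exact hpos
    · rw [if_neg (by simpa using hdvd)]
      refine ⟨0, by simp, by simp, ?_, by simpa using hm⟩
      simpa using fun hd => hdvd ((PySem.Int.mod_eq_zero_iff_dvd m p).2 hd)

-- uniqueness of the representation d * p^k with d ∣ C, p prime, p ∤ C
theorem pvRepInjAux (p C d d' : Int) (k k' : Nat) (hp : Prime p) (hpC : ¬ p ∣ C)
    (hd : d ∣ C) (hd' : d' ∣ C) (hle : k ≤ k') (h : d * p ^ k = d' * p ^ k') :
    d = d' ∧ k = k' := by
  have hp0 : p ≠ 0 := hp.ne_zero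
  have hpk : (p : Int) ^ k ≠ 0 := pow_ne_zero _ hp0
  have hsplit : p ^ k' = p ^ (k' - k) * p ^ k := by rw [← pow_add]; congr 1; omega
  rw [hsplit, ← mul_assoc] at h
  have hdd : d = d' * p ^ (k' - k) := mul_right_cancel₀ hpk h
  by_cases hkk : k = k'
  · subst hkk
    simp at hdd
    exact ⟨hdd, rfl⟩
  · exfalso
    have hdvd : p ∣ d := by
      rw [hdd]
      exact Dvd.dvd.mul_left (dvd_pow_self p (by omega : k' - k ≠ 0)) d'
    exact hpC (hdvd.trans hd)

theorem pvRepInj (p C d d' : Int) (k k' : Nat) (hp : Prime p) (hpC : ¬ p ∣ C)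
    (hd : d ∣ C) (hd' : d' ∣ C) (h : d * p ^ k = d' * p ^ k') : d = d' ∧ k = k' := by
  rcases le_total k k' with hle | hle
  · exact pvRepInjAux p C d d' k k' hp hpC hd hd' hle h
  · obtain ⟨h1, h2⟩ := pvRepInjAux p C d' d k' k hp hpC hd' hd hle h.symm
    exact ⟨h1.symm, h2.symm⟩

-- extending a complete duplicate-free divisor list of C by the powers of a new prime p
theorem pvMemExtend (p C : Int) (e : Nat) (hp : Prime p) (hp2 : 2 ≤ p) (hC : 1 ≤ C)
    (hpC : ¬ p ∣ C) (divs : List Int) (hmem : ∀ x, x ∈ divs ↔ 1 ≤ x ∧ x ∣ C)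
    (hnd : divs.Nodup) :
    (∀ x, x ∈ pvExtend divs p (e : Int) ↔ 1 ≤ x ∧ x ∣ C * p ^ e) ∧
      (pvExtend divs p (e : Int)).Nodup := by
  constructor
  · intro x
    unfold pvExtend
    rw [List.mem_flatMap]
    constructor
    · rintro ⟨d, hdmem, hx⟩
      rw [List.mem_map] at hx
      obtain ⟨k, hk, rfl⟩ := hx
      rw [PySem.List.mem_pyRange_one] at hk
      obtain ⟨hd1, hdC⟩ := (hmem d).1 hdmem
      have hkle : k.toNat ≤ e := by omega
      have hppow : (1:Int) ≤ p ^ k.toNat := one_le_pow₀ (by omega)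
      refine ⟨by nlinarith, mul_dvd_mul hdC (pow_dvd_pow p hkle)⟩
    · rintro ⟨hx1, hxd⟩
      obtain ⟨k, y, hxe, hy1, hpy⟩ := pvPowFactor p x hp2 hx1
      have hcopy : IsCoprime y p := ((Prime.coprime_iff_not_dvd hp).2 hpy).symm
      have hyx : y ∣ x := ⟨p ^ k, by rw [hxe]; ring⟩
      have hyC : y ∣ C := (hcopy.pow_right).dvd_of_dvd_mul_right (hyx.trans hxd)
      have hpkx : p ^ k ∣ x := ⟨y, hxe⟩
      have hcopC : IsCoprime (p ^ k) C := ((Prime.coprime_iff_not_dvd hp).2 hpC).pow_left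
      have hpke : p ^ k ∣ p ^ e := hcopC.dvd_of_dvd_mul_left (hpkx.trans hxd)
      have hkle : k ≤ e := (pow_dvd_pow_iff hp.ne_zero hp.not_unit).1 hpke
      refine ⟨y, (hmem y).2 ⟨hy1, hyC⟩, List.mem_map.2 ⟨(k : Int), ?_, ?_⟩⟩
      · rw [PySem.List.mem_pyRange_one]; omega
      · simp [hxe, mul_comm]
  · unfold pvExtend
    rw [List.nodup_flatMap]
    constructor
    · intro d hdmem
      obtain ⟨hd1, _⟩ := (hmem d).1 hdmem
      apply List.Nodup.map_on ?_ (PySem.List.nodup_pyRange_one _ _)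
      intro k hk k' hk' heq
      rw [PySem.List.mem_pyRange_one] at hk hk'
      have hdz : d ≠ 0 := by omega
      have hpp : p ^ k.toNat = p ^ k'.toNat := mul_left_cancel₀ hdz heq
      have hd1 : p ^ k.toNat ∣ p ^ k'.toNat := by rw [hpp]
      have hd2 : p ^ k'.toNat ∣ p ^ k.toNat := by rw [hpp]
      have ha := (pow_dvd_pow_iff hp.ne_zero hp.not_unit).1 hd1
      have hb' := (pow_dvd_pow_iff hp.ne_zero hp.not_unit).1 hd2
      omega
    · apply List.Pairwise.imp_of_mem ?_ hnd
      intro d d' hdm hdm' hne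
      intro x hx hx'
      rw [List.mem_map] at hx hx'
      obtain ⟨k, _, hk⟩ := hx
      obtain ⟨k', _, hk'⟩ := hx'
      obtain ⟨hd1, hdC⟩ := (hmem d).1 hdm
      obtain ⟨hd'1, hd'C⟩ := (hmem d').1 hdm'
      exact hne (pvRepInj p C d d' k.toNat k'.toNat hp hpC hdC hd'C (by rw [hk, hk'])).1

-- the final step: appending the remaining prime cofactor q to a complete divisor list of C
theorem pvMemFinal (q C : Int) (hq : Prime q) (hq0 : 0 < q) (hC : 1 ≤ C) (hqC : ¬ q ∣ C)
    (divs : List Int) (hmem : ∀ x, x ∈ divs ↔ 1 ≤ x ∧ x ∣ C) (hnd : divs.Nodup) :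
    (∀ x, x ∈ divs.flatMap (fun d => [d * 1, d * q]) ↔ 1 ≤ x ∧ x ∣ C * q) ∧
      (divs.flatMap (fun d => [d * 1, d * q])).Nodup := by
  have hq2 : 2 ≤ q := pvPrimeTwoLe q hq0 hq
  constructor
  · intro x
    rw [List.mem_flatMap]
    constructor
    · rintro ⟨d, hdmem, hx⟩
      obtain ⟨hd1, hdC⟩ := (hmem d).1 hdmem
      have hx' : x = d ∨ x = d * q := by simpa using hx
      rcases hx' with rfl | rfl
      · exact ⟨hd1, hdC.trans (dvd_mul_right C q)⟩
      · exact ⟨by nlinarith, mul_dvd_mul hdC dvd_rfl⟩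
    · rintro ⟨hx1, hxd⟩
      by_cases hqx : q ∣ x
      · have hmp : q * (x / q) = x := Int.mul_ediv_cancel' hqx
        have hy1 : 1 ≤ x / q := by nlinarith
        have hyC : x / q ∣ C := by
          have h1 : (x / q) * q ∣ C * q := by rw [mul_comm (x/q) q, hmp]; exact hxd
          exact (mul_dvd_mul_iff_right (show q ≠ 0 by omega)).1 h1
        refine ⟨x / q, (hmem _).2 ⟨hy1, hyC⟩, ?_⟩
        have hxq : x / q * q = x := by rw [mul_comm]; exact hmp
        simp [hxq]
      · have hcop : IsCoprime x q := ((Prime.coprime_iff_not_dvd hq).2 hqx).symm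
        have hxC : x ∣ C := hcop.dvd_of_dvd_mul_right hxd
        exact ⟨x, (hmem x).2 ⟨hx1, hxC⟩, by simp⟩
  · rw [List.nodup_flatMap]
    constructor
    · intro d hdmem
      obtain ⟨hd1, _⟩ := (hmem d).1 hdmem
      simp only [List.nodup_cons, List.mem_singleton, List.not_mem_nil, not_false_iff,
        List.nodup_nil, and_true]
      intro h
      nlinarith [h]
    · apply List.Pairwise.imp_of_mem ?_ hnd
      intro d d' hdm hdm' hne
      intro x hx hx'
      obtain ⟨hd1, hdC⟩ := (hmem d).1 hdm
      obtain ⟨hd'1, hd'C⟩ := (hmem d').1 hdm'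
      have hx1 : x = d ∨ x = d * q := by simpa using hx
      have hx2 : x = d' ∨ x = d' * q := by simpa using hx'
      rcases hx1 with h1 | h1 <;> rcases hx2 with h2 | h2
      · exact hne (h1.symm.trans h2)
      · refine hqC (Dvd.dvd.trans ⟨d', ?_⟩ hdC)
        rw [← h1, h2]; ring
      · refine hqC (Dvd.dvd.trans ⟨d, ?_⟩ hd'C)
        rw [← h2, h1]; ring
      · refine hne (mul_right_cancel₀ (show q ≠ 0 by omega) ?_)
        rw [← h1, ← h2]

-- when the trial divisor has passed √m, the remaining cofactor m > 1 is prime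
theorem pvLeftoverPrime (m p : Int) (hp0 : 0 ≤ p) (hm : 1 < m) (hsq : m < p * p)
    (hall : ∀ q, 0 < q → Prime q → q ∣ m → p ≤ q) : Prime m := by
  obtain ⟨q, hq0, hqp, hqd⟩ := pvExistsPosPrime m hm
  have hqle := Int.le_of_dvd (by omega) hqd
  have ht : q * (m / q) = m := Int.mul_ediv_cancel' hqd
  have hq2 : 2 ≤ q := pvPrimeTwoLe q hq0 hqp
  have ht1 : 1 ≤ m / q := by nlinarith
  by_cases h1 : m / q = 1
  · rw [h1, mul_one] at ht
    rwa [← ht]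
  · exfalso
    have ht2 : 1 < m / q := by omega
    obtain ⟨q2, hq20, hq2p, hq2d⟩ := pvExistsPosPrime (m / q) ht2
    have hq2m : q2 ∣ m := hq2d.trans ⟨q, by rw [mul_comm]; exact ht.symm⟩
    have hp1 := hall q hq0 hqp hqd
    have hp2 := hall q2 hq20 hq2p hq2m
    have hq2le : q2 ≤ m / q := Int.le_of_dvd (by omega) hq2d
    nlinarith [mul_le_mul hp1 hp2 hp0 (by omega : (0:Int) ≤ q),
      mul_le_mul_of_nonneg_left hq2le (by omega : (0:Int) ≤ q)]

-- if p divides m and every positive prime factor of m is ≥ p, then p is prime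
theorem pvTrialPrime (m p : Int) (hp2 : 2 ≤ p) (hpm : p ∣ m) (hm1 : 1 ≤ m)
    (hall : ∀ q, 0 < q → Prime q → q ∣ m → p ≤ q) : Prime p := by
  obtain ⟨q, hq0, hqp, hqd⟩ := pvExistsPosPrime p (by omega)
  have hqle := Int.le_of_dvd (by omega) hqd
  have hge := hall q hq0 hqp (hqd.trans hpm)
  have : q = p := by omega
  rwa [← this]

-- unfolding equations for the fuelled loop
theorem pvFactorLoop_zero_eq (m p : Int) (divs : List Int) :
    pvFactorLoop 0 m p divs = (m, divs) := by
  unfold pvFactorLoop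
  split_ifs <;> rfl

theorem pvFactorLoop_succ_eq (f : Nat) (m p : Int) (divs : List Int) :
    pvFactorLoop (f + 1) m p divs =
      if p * p ≤ m then
        (if PySem.Int.mod m p == 0 then
          pvFactorLoop f (pvExtract 64 p m 0).2 (p + 1) (pvExtend divs p (pvExtract 64 p m 0).1)
        else pvFactorLoop f m (p + 1) divs)
      else (m, divs) := rfl

-- the outer factorisation loop: invariant-carrying specification
theorem pvFactorLoop_spec : ∀ (f : Nat) (p m C : Int) (divs : List Int),
    46343 ≤ p + (f : Int) → 2 ≤ p → 1 ≤ m → m ≤ 2147483648 → 1 ≤ C →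
    divs.Nodup → (∀ x, x ∈ divs ↔ 1 ≤ x ∧ x ∣ C) →
    (∀ q, 0 < q → Prime q → q ∣ C → q < p) →
    (∀ q, 0 < q → Prime q → q ∣ m → p ≤ q) →
    ∃ (C' p' : Int),
      1 ≤ C' ∧ p ≤ p' ∧ C' * (pvFactorLoop f m p divs).1 = C * m ∧ 1 ≤ (pvFactorLoop f m p divs).1 ∧
      (pvFactorLoop f m p divs).1 < p' * p' ∧
      (pvFactorLoop f m p divs).2.Nodup ∧
      (∀ x, x ∈ (pvFactorLoop f m p divs).2 ↔ 1 ≤ x ∧ x ∣ C') ∧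
      (∀ q, 0 < q → Prime q → q ∣ C' → q < p') ∧
      (∀ q, 0 < q → Prime q → q ∣ (pvFactorLoop f m p divs).1 → p' ≤ q) := by
  intro f
  induction f with
  | zero =>
    intro p m C divs hf hp hm hmb hC hnd hmem hCp hmp
    rw [pvFactorLoop_zero_eq]
    refine ⟨C, p, hC, le_rfl, rfl, hm, ?_, hnd, hmem, hCp, hmp⟩
    push_cast at hf
    dsimp only
    nlinarith
  | succ f ih =>
    intro p m C divs hf hp hm hmb hC hnd hmem hCp hmp
    rw [pvFactorLoop_succ_eq]
    by_cases hguard : p * p ≤ m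
    · rw [if_pos hguard]
      by_cases hdvd : PySem.Int.mod m p = 0
      · have hpd : p ∣ m := (PySem.Int.mod_eq_zero_iff_dvd m p).1 hdvd
        have hprime : Prime p := pvTrialPrime m p hp hpd (by omega) hmp
        obtain ⟨k, hex, hdk, hndvd, hpos⟩ :=
          pvExtract_spec 64 m 0 p hp (by omega) (by norm_num; omega)
        have hpC : ¬ p ∣ C := fun hd => absurd (hCp p (by omega) hprime hd) (by omega)
        obtain ⟨hmemE, hndE⟩ := pvMemExtend p C k hprime hp hC hpC divs hmem hnd
        have hmk : p ^ k * (m / p ^ k) = m := Int.mul_ediv_cancel' hdk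
        have hk1 : 1 ≤ k := by
          by_contra hk0
          have : k = 0 := by omega
          subst this
          simp at hndvd hpos hmk
          exact hndvd hpd
        have hppow : (1:Int) ≤ p ^ k := one_le_pow₀ (by omega)
        have hCnew : 1 ≤ C * p ^ k := by nlinarith
        have hCpnew : ∀ q, 0 < q → Prime q → q ∣ C * p ^ k → q < p + 1 := by
          intro q hq0 hqp hqd
          rcases hqp.dvd_mul.1 hqd with h | h
          · have := hCp q hq0 hqp h; omega
          · have hqdp : q ∣ p := hqp.dvd_of_dvd_pow h
            have := Int.le_of_dvd (by omega) hqdp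
            have := hmp q hq0 hqp (hqdp.trans hpd)
            omega
        have hdvdm : m / p ^ k ∣ m := ⟨p ^ k, by rw [mul_comm]; exact hmk.symm⟩
        have hmpnew : ∀ q, 0 < q → Prime q → q ∣ m / p ^ k → p + 1 ≤ q := by
          intro q hq0 hqp hqd
          have hqm : q ∣ m := hqd.trans hdvdm
          have hge := hmp q hq0 hqp hqm
          have hne : q ≠ p := by
            rintro rfl
            exact hndvd hqd
          omega
        have hm'le : m / p ^ k ≤ 2147483648 :=
          le_trans (Int.le_of_dvd (by omega) hdvdm) hmb
        simp only [hdvd, beq_self_eq_true, if_true]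
        rw [hex]
        simp only [zero_add]
        obtain ⟨C', p', h1, hpl, h2, h3, h4, h5, h6, h7, h8⟩ :=
          ih (p + 1) (m / p ^ k) (C * p ^ k)
            (pvExtend divs p (k : Int))
            (by push_cast at hf ⊢; omega) (by omega) hpos hm'le hCnew hndE hmemE hCpnew hmpnew
        refine ⟨C', p', h1, by omega, ?_, h3, h4, h5, h6, h7, h8⟩
        rw [h2]
        linear_combination C * hmk
      · have hpC : ∀ q, 0 < q → Prime q → q ∣ C → q < p + 1 := by
          intro q hq0 hqp hqd; have := hCp q hq0 hqp hqd; omega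
        have hmp' : ∀ q, 0 < q → Prime q → q ∣ m → p + 1 ≤ q := by
          intro q hq0 hqp hqd
          have hge := hmp q hq0 hqp hqd
          have hne : q ≠ p := by
            rintro rfl
            exact hdvd ((PySem.Int.mod_eq_zero_iff_dvd m q).2 hqd)
          omega
        rw [if_neg (by simpa using hdvd)]
        obtain ⟨C', p', h1, hpl, hrest⟩ :=
          ih (p + 1) m C divs (by push_cast at hf ⊢; omega) (by omega) hm hmb hC hnd hmem
            hpC hmp'
        exact ⟨C', p', h1, by omega, hrest⟩
    · rw [if_neg hguard]
      exact ⟨C, p, hC, le_rfl, rfl, hm, not_le.1 hguard, hnd, hmem, hCp, hmp⟩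

-- B's divisor list is exactly the divisors of n in [1, n], without duplicates
theorem pvDivListB_spec (n : Int) (h1 : 1 ≤ n) (hb : n ≤ 2147483648) :
    (pvDivListB n).Nodup ∧ ∀ x, x ∈ pvDivListB n ↔ 1 ≤ x ∧ x ∣ n := by
  unfold pvDivListB
  rw [if_pos (show n ≥ 0 by omega)]
  dsimp only
  rw [if_pos (show n ≥ 1 by omega)]
  obtain ⟨C', p', hC'1, hple, hprod, hm1, hlt, hnd', hmem', hCp', hmp'⟩ :=
    pvFactorLoop_spec 46341 2 n 1 [1] (by norm_num) (by norm_num) h1 hb (by norm_num)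
      (by simp)
      (by
        intro x
        simp only [List.mem_singleton]
        constructor
        · rintro rfl; exact ⟨le_refl 1, dvd_refl 1⟩
        · rintro ⟨hx1, hxd⟩
          exact le_antisymm (Int.le_of_dvd one_pos hxd) hx1 |>.symm ▸ rfl)
      (by
        intro q hq0 hqp hqd
        exact absurd (isUnit_of_dvd_one hqd) hqp.not_unit)
      (fun q hq0 hqp _ => pvPrimeTwoLe q hq0 hqp)
  rw [one_mul] at hprod
  by_cases hbig : (pvFactorLoop 46341 n 2 [1]).1 > 1
  · rw [if_pos hbig]
    have hprime : Prime (pvFactorLoop 46341 n 2 [1]).1 :=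
      pvLeftoverPrime _ p' (by omega) hbig hlt hmp'
    have hnotd : ¬ (pvFactorLoop 46341 n 2 [1]).1 ∣ C' := by
      intro hd
      have hlt' := hCp' _ (by omega) hprime hd
      have hge' := hmp' _ (by omega) hprime dvd_rfl
      omega
    obtain ⟨hmemF, hndF⟩ := pvMemFinal _ C' hprime (by omega) hC'1 hnotd _ hmem' hnd'
    refine ⟨hndF, fun x => ?_⟩
    rw [hmemF x, hprod]
  · rw [if_neg hbig]
    have hone : (pvFactorLoop 46341 n 2 [1]).1 = 1 := by omega
    rw [hone, mul_one] at hprod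
    subst hprod
    exact ⟨hnd', hmem'⟩

-- ---- the shared fold analysis (identical loop body on both sides) ----

-- the dict component of the loop is a plain counting loop (independent of tot / the cap)
theorem pvFoldA_snd (L : List Int) : ∀ (t : Int) (cd : PySem.Dict Int Int),
    (L.foldl pvBodyA (t, cd)).2 = L.foldl (fun d x => d.modify x 0 (fun v => v + 1)) cd := by
  induction L with
  | nil => intro t cd; rfl
  | cons d L ih =>
    intro t cd
    rw [List.foldl_cons, List.foldl_cons, pvBodyA_eq]
    exact ih _ _

-- the tot component: with a duplicate-free divisor list, each d contributes d*11 iff its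
-- starting count admits one more delivery
theorem pvFoldA_fst (L : List Int) : ∀ (t : Int) (cd : PySem.Dict Int Int), L.Nodup →
    (L.foldl pvBodyA (t, cd)).1
      = t + (L.map (fun d => if cd.getD d 0 + 1 > 50 then 0 else d * 11)).sum := by
  induction L with
  | nil => intro t cd _; simp
  | cons d L ih =>
    intro t cd hnd
    rw [List.nodup_cons] at hnd
    rw [List.foldl_cons, pvBodyA_eq, List.map_cons, List.sum_cons, ih _ _ hnd.2]
    have hmap : L.map (fun e => if (cd.modify d 0 (· + 1)).getD e 0 + 1 > 50 then 0 else e * 11)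
        = L.map (fun e => if cd.getD e 0 + 1 > 50 then 0 else e * 11) := by
      apply List.map_congr_left
      intro e he
      have hne : e ≠ d := fun h => hnd.1 (h ▸ he)
      rw [PySem.Dict.getD_modify, if_neg hne]
    rw [hmap]
    split_ifs <;> ring

-- a counting loop over keys already present leaves the key list unchanged
theorem pvKeys_foldl_modify (L : List Int) (cd : PySem.Dict Int Int)
    (h : ∀ k ∈ L, k ∈ cd.keys) :
    (L.foldl (fun d x => d.modify x 0 (fun v => v + 1)) cd).keys = cd.keys := by
  rw [PySem.Dict.keys_foldl_modify L 0 (fun _ _ => (fun v => v + 1)) cd,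
      PySem.Set.update_eq_append_filter]
  have hnil : (PySem.Set.ofList L).filter (fun y => !PySem.Set.contains cd.keys y) = [] := by
    rw [List.filter_eq_nil_iff]
    intro a ha
    have hm : a ∈ cd.keys := h a ((PySem.Set.mem_ofList _ _).1 ha)
    simp [PySem.Set.contains, hm]
  rw [hnil, List.append_nil]

-- ===== VERDICT (by name: the statement is the Claim_ definition above) =====
theorem count_presents_spec : Claim_equal_count_presents := by
  intro n count_div hdom hpre
  obtain ⟨hn, hnd, hkeys⟩ := hpre
  have hb : n ≤ 2147483648 := by
    simp only [Dom_count_presents, pvDomInt, Bool.and_eq_true, decide_eq_true_eq] at hdom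
    exact hdom.1.2
  unfold Spec_count_presents count_presents count_presents_alt
  rw [pvBodyB_eq_pvBodyA]
  by_cases hzero : n = 0
  · subst hzero
    have hA : pvDivisors 0 = [] := by decide
    have hB : pvDivListB 0 = [] := by decide
    simp [hA, hB]
  · have hn1 : 1 ≤ n := by omega
    obtain ⟨hLBnd, hBmem⟩ := pvDivListB_spec n hn1 hb
    -- every divisor of n is a key of count_div
    have hdivkey : ∀ x, 1 ≤ x → x ≤ n → x ∣ n → x ∈ count_div.map Prod.fst := by
      intro x hx1 hxn hdvd
      obtain ⟨i, hi1, hii, hm, hxi⟩ := pvSmallPartner n x hx1 hxn hdvd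
      have hi46 : i ≤ 46341 := by nlinarith
      have hmem : i ∈ PySem.List.pyRange 1 (min (n + 1) 46342) 1 := by
        rw [PySem.List.mem_pyRange_one]
        refine ⟨hi1, ?_⟩
        have : i ≤ n := by nlinarith
        omega
      obtain ⟨h1, h2⟩ := hkeys i hmem hii hm
      rcases hxi with h | h <;> exact h ▸ ‹_›
    have hkeys_eq : (PySem.Dict.mk count_div).keys = count_div.map Prod.fst :=
      PySem.Dict.keys_mk count_div
    have hndk : (PySem.Dict.mk count_div).keys.Nodup := hkeys_eq ▸ hnd
    have hLAmem : ∀ x, x ∈ pvDivisors n ↔ (1 ≤ x ∧ x ≤ n ∧ x ∣ n) :=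
      fun x => mem_pvDivisors n x (by omega) hb
    have hLBmem : ∀ x, x ∈ pvDivListB n ↔ (1 ≤ x ∧ x ≤ n ∧ x ∣ n) := by
      intro x
      rw [hBmem x]
      constructor
      · rintro ⟨h1, h2⟩
        exact ⟨h1, Int.le_of_dvd (by omega) h2, h2⟩
      · rintro ⟨h1, _, h2⟩
        exact ⟨h1, h2⟩
    have hLAnd : (pvDivisors n).Nodup := PySem.Set.nodup_ofList _
    have hperm : (pvDivisors n).Perm (pvDivListB n) :=
      (List.perm_ext_iff_of_nodup hLAnd hLBnd).2 (fun a => (hLAmem a).trans (hLBmem a).symm)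
    have hsub : ∀ k ∈ pvDivisors n, k ∈ (PySem.Dict.mk count_div).keys := by
      intro k hk
      obtain ⟨h1, h2, h3⟩ := (hLAmem k).1 hk
      exact hkeys_eq ▸ hdivkey k h1 h2 h3
    have hsubB : ∀ k ∈ pvDivListB n, k ∈ (PySem.Dict.mk count_div).keys :=
      fun k hk => hsub k (hperm.mem_iff.2 hk)
    -- normal form of either side
    have hform : ∀ L : List Int, L.Nodup → (∀ k ∈ L, k ∈ (PySem.Dict.mk count_div).keys) →
        ((L.foldl pvBodyA (0, PySem.Dict.mk count_div)).1,
         (L.foldl pvBodyA (0, PySem.Dict.mk count_div)).2.items)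
          = ((L.map (fun d =>
                if (PySem.Dict.mk count_div).getD d 0 + 1 > 50 then 0 else d * 11)).sum,
             (PySem.Dict.mk count_div).keys.map
               (fun k => (k, (PySem.Dict.mk count_div).getD k 0 + (L.count k : Int)))) := by
      intro L hLnd hLsub
      rw [pvFoldA_fst L 0 _ hLnd, pvFoldA_snd L 0 _]
      have hfk := pvKeys_foldl_modify L (PySem.Dict.mk count_div) hLsub
      rw [PySem.Dict.items_eq_map_keys _ (hfk ▸ hndk) 0, hfk]
      simp only [zero_add]
      congr 1
      apply List.map_congr_left
      intro k _
      rw [PySem.Dict.getD_foldl_modify_add_one]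
    simp only
    rw [hform (pvDivisors n) hLAnd hsub, hform (pvDivListB n) hLBnd hsubB]
    simp only [Prod.mk.injEq]
    refine ⟨(hperm.map _).sum_eq, ?_⟩
    apply List.map_congr_left
    intro k _
    rw [hperm.count_eq]
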